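-- pv_equiv track=rewrite | github.com/jamali005/Adventofcode2024 | Day1/Day1.py | calculate_similarity_score
-- ===== SOURCE A (Python) =====
-- def calculate_similarity_score(left_list, right_list):
--     right_count = {}
--     for num in right_list:
--         if num in right_count:
--             right_count[num] += 1
--         else:
--             right_count[num] = 1
--     similarity_score = 0
--     for num in left_list:
--         if num in right_count:
--             similarity_score += num * right_count[num]
--
--     return similarity_score
-- ===== SOURCE B (Python) =====
-- def calculate_similarity_score(left_list, right_list):
--     left_count = {}
--     for num in left_list:
--         left_count[num] = left_count.get(num, 0) + 1
--     right_count = {}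
--     for num in right_list:
--         right_count[num] = right_count.get(num, 0) + 1
--     return sum(v * c * right_count.get(v, 0) for v, c in left_count.items())
-- ===== Notes on version B (the rewrite author's own statement) =====
-- stated objective: alternative
-- what changed: B counts both lists into frequency maps and sums v * left_count[v] * right_count[v] over the distinct left values, instead of A's per-left-element loop that multiplies each occurrence separately.
import Mathlib
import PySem

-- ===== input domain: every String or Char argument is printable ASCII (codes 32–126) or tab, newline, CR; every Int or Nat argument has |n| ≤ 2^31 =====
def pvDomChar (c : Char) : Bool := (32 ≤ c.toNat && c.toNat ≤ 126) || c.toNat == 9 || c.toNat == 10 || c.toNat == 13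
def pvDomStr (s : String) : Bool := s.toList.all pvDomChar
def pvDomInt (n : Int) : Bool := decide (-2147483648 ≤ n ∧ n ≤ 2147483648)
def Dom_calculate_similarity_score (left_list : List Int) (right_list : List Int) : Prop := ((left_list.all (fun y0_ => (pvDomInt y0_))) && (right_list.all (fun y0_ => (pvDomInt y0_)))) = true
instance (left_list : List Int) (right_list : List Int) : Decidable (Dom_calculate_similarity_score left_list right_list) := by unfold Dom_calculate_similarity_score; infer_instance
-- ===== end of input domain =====

-- B reorganises the computation around distinct values: it counts BOTH lists into
-- frequency maps and sums v * left_count[v] * right_count[v] over the left map's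
-- items, instead of A's per-left-element loop; same return value, similar cost.

-- ===== PORT A =====
def calculate_similarity_score (left_list : List Int) (right_list : List Int) : Int :=
  let right_count : PySem.Dict Int Int :=
    right_list.foldl (fun d num =>
      if d.contains num then d.insert num (d.getD num 0 + 1) else d.insert num 1)
      PySem.Dict.empty
  left_list.foldl (fun score num =>
    if right_count.contains num then score + num * right_count.getD num 0 else score) 0

-- ===== PORT B =====
def calculate_similarity_score_alt (left_list : List Int) (right_list : List Int) : Int :=
  let left_count : PySem.Dict Int Int :=
    left_list.foldl (fun d num => d.insert num (d.getD num 0 + 1)) PySem.Dict.empty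
  let right_count : PySem.Dict Int Int :=
    right_list.foldl (fun d num => d.insert num (d.getD num 0 + 1)) PySem.Dict.empty
  left_count.items.foldl (fun s p => s + p.1 * p.2 * right_count.getD p.1 0) 0

-- ===== PRECONDITION & SPEC =====
def Spec_calculate_similarity_score (left_list : List Int) (right_list : List Int) (out : Int) : Prop := out = calculate_similarity_score_alt left_list right_list
instance (left_list : List Int) (right_list : List Int) (out : Int) : Decidable (Spec_calculate_similarity_score left_list right_list out) := by unfold Spec_calculate_similarity_score; infer_instance

-- ===== CLAIM (what is proved, stated in full; the proofs are below) =====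
def Claim_equal_calculate_similarity_score : Prop := ∀ (left_list : List Int) (right_list : List Int), Dom_calculate_similarity_score left_list right_list → Spec_calculate_similarity_score left_list right_list (calculate_similarity_score left_list right_list)

-- ===== LEMMAS AND PROOFS =====

-- A's branching counter loop builds exactly Counter(right_list).
theorem countA_eq_counter (r : List Int) :
    r.foldl (fun d num =>
      if d.contains num then d.insert num (d.getD num 0 + 1) else d.insert num 1)
      PySem.Dict.empty = PySem.Dict.counter r := by
  rw [← PySem.Dict.foldl_insert_getD_add_one_eq_counter]
  apply PySem.List.foldl_congr_mem
  intro d num _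
  by_cases h : d.contains num
  · simp [h]
  · rw [PySem.Dict.getD_of_not_contains (h := by simpa using h)]
    simp [h]

-- A's value: each left occurrence contributes num * count(num, right).
theorem calcA_eq_sum (l r : List Int) :
    calculate_similarity_score l r
      = (l.map (fun x => x * (r.count x : Int))).sum := by
  unfold calculate_similarity_score
  rw [countA_eq_counter]
  have hstep : l.foldl (fun score num =>
      if (PySem.Dict.counter r).contains num then
        score + num * (PySem.Dict.counter r).getD num 0 else score) 0
      = l.foldl (fun score num => score + num * (r.count num : Int)) 0 := by
    apply PySem.List.foldl_congr_mem
    intro score num _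
    by_cases h : (PySem.Dict.counter r).contains num
    · simp [h, PySem.Dict.getD_counter]
    · have : r.count num = 0 := by
        rw [List.count_eq_zero]
        intro hmem
        simp [PySem.Dict.contains_counter] at h
        exact h hmem
      simp [h, this]
  rw [hstep, PySem.List.foldl_add]
  simp
theorem calcB_eq_sum (l r : List Int) :
    calculate_similarity_score_alt l r
      = ((PySem.Set.ofList l).map
          (fun v => v * (l.count v : Int) * (r.count v : Int))).sum := by
  unfold calculate_similarity_score_alt
  rw [PySem.Dict.foldl_insert_getD_add_one_eq_counter,
      PySem.Dict.foldl_insert_getD_add_one_eq_counter]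
  simp only [PySem.Dict.items_counter]
  rw [PySem.List.foldl_add]
  simp only [PySem.Dict.getD_counter, List.map_map, zero_add]
  rfl

-- The per-occurrence sum regrouped by distinct value.
theorem sum_regroup (l r : List Int) :
    (l.map (fun x => x * (r.count x : Int))).sum
      = ((PySem.Set.ofList l).map
          (fun v => v * (l.count v : Int) * (r.count v : Int))).sum := by
  rw [Finset.sum_list_map_count l (fun x => x * (r.count x : Int))]
  have hfin : (PySem.Set.ofList l).toFinset = l.toFinset := by
    ext x; simp [PySem.Set.mem_ofList]
  rw [← List.sum_toFinset _ (PySem.Set.nodup_ofList l), hfin]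
  refine Finset.sum_congr rfl (fun m _ => ?_)
  rw [nsmul_eq_mul]
  ring

-- ===== VERDICT (by name: the statement is the Claim_ definition above) =====
theorem calculate_similarity_score_spec : Claim_equal_calculate_similarity_score := by
  intro l r _
  unfold Spec_calculate_similarity_score
  rw [calcA_eq_sum, calcB_eq_sum, sum_regroup]
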